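-- pv_equiv track=rewrite | github.com/woong-jae/Algorithm-Crash | Programmers/[87391] 공 이동 시뮬레이션/Johoseong/87391.py | solution
-- ===== SOURCE A (Python) =====
-- def solution(n, m, x, y, queries):
--     s_r, s_c, e_r, e_c = x, y, x, y
--
--     while queries:
--         d, dx = queries.pop()
--         if d == 0:
--             if s_c == 0:
--                 e_c = min(m - 1, e_c + dx)
--             else:
--                 if s_c + dx >= m: # 불가능 경우
--                     return 0
--                 s_c = min(m - 1, s_c + dx)
--                 e_c = min(m - 1, e_c + dx)
--
--         elif d == 1:
--             if e_c == (m - 1):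
--                 s_c = max(0, s_c - dx)
--             else:
--                 if e_c - dx < 0: # 불가능 경우
--                     return 0
--                 s_c = max(0, s_c - dx)
--                 e_c = max(0, e_c - dx)
--
--         elif d == 2:
--             if s_r == 0:
--                 e_r = min(n - 1, e_r + dx)
--             else:
--                 if s_r + dx >= n:
--                     return 0
--                 s_r = min(n - 1, s_r + dx)
--                 e_r = min(n - 1, e_r + dx)
--         else:
--             if e_r == (n - 1):
--                 s_r = max(0, s_r - dx)
--             else:
--                 if e_r - dx < 0:
--                     return 0
--                 s_r = max(0, s_r - dx)
--                 e_r = max(0, e_r - dx)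
--
--     return (e_r - s_r + 1) * (e_c - s_c + 1)
-- ===== SOURCE B (Python) =====
-- def solution(n, m, x, y, queries):
--     # Row and column bounds evolve independently: simulate each axis once
--     # with a shared 1D helper over its own sub-sequence of reversed queries.
--     # (A empties/mutates `queries` via pop(); equivalence is on the return value.)
--     def axis(L, start, steps):
--         # steps: (forward, dx) pairs, already in reverse query order
--         s = e = start
--         for forward, dx in steps:
--             if forward:
--                 if s == 0:
--                     e = min(L - 1, e + dx)
--                 else:
--                     if s + dx >= L:
--                         return None  # impossible
--                     s = min(L - 1, s + dx)
--                     e = min(L - 1, e + dx)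
--             else:
--                 if e == L - 1:
--                     s = max(0, s - dx)
--                 else:
--                     if e - dx < 0:
--                         return None  # impossible
--                     s = max(0, s - dx)
--                     e = max(0, e - dx)
--         return e - s + 1
--     rev = queries[::-1]
--     col = axis(m, y, [(d == 0, dx) for d, dx in rev if d == 0 or d == 1])
--     row = axis(n, x, [(d == 2, dx) for d, dx in rev if not (d == 0 or d == 1)])
--     if col is None or row is None:
--         return 0
--     return row * col
-- ===== Notes on version B (the rewrite author's own statement) =====
-- stated objective: alternative
-- what changed: B splits the reversed query list into the column and row sub-sequences and simulates each axis independently with one shared 1D helper (returning None on an impossible step), multiplying the two interval lengths, instead of A's single loop threading a 4-component state through four duplicated branches; A also empties `queries` via pop() while B leaves it intact (equivalence is on the return value).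
import Mathlib
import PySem

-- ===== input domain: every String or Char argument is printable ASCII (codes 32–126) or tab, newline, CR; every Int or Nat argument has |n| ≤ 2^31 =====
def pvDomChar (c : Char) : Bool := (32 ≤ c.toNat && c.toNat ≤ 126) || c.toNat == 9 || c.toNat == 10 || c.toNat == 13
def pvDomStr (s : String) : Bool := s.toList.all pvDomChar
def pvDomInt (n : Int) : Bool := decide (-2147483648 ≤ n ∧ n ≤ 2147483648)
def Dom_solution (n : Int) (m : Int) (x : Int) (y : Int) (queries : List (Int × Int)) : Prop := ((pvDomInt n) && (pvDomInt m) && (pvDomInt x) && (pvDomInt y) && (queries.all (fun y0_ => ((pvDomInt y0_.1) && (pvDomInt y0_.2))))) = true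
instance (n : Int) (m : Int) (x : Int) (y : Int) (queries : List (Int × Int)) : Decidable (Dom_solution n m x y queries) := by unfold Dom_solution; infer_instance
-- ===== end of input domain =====

-- B simulates the two axes independently with one shared 1D helper; A interleaves
-- them in a single loop with a 4-component state. A also empties `queries` via
-- pop(); the equivalence proved here is about the RETURN value only.

-- ===== PORT A =====
-- A pops from the back of `queries`, i.e. processes queries.reverse front-to-back.
def solutionGo (n : Int) (m : Int) : List (Int × Int) → Int → Int → Int → Int → Int
  | [], s_r, s_c, e_r, e_c => (e_r - s_r + 1) * (e_c - s_c + 1)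
  | (d, dx) :: rest, s_r, s_c, e_r, e_c =>
    if d = 0 then
      if s_c = 0 then solutionGo n m rest s_r s_c e_r (min (m - 1) (e_c + dx))
      else if s_c + dx ≥ m then 0
      else solutionGo n m rest s_r (min (m - 1) (s_c + dx)) e_r (min (m - 1) (e_c + dx))
    else if d = 1 then
      if e_c = m - 1 then solutionGo n m rest s_r (max 0 (s_c - dx)) e_r e_c
      else if e_c - dx < 0 then 0
      else solutionGo n m rest s_r (max 0 (s_c - dx)) e_r (max 0 (e_c - dx))
    else if d = 2 then
      if s_r = 0 then solutionGo n m rest s_r s_c (min (n - 1) (e_r + dx)) e_c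
      else if s_r + dx ≥ n then 0
      else solutionGo n m rest (min (n - 1) (s_r + dx)) s_c (min (n - 1) (e_r + dx)) e_c
    else
      if e_r = n - 1 then solutionGo n m rest (max 0 (s_r - dx)) s_c e_r e_c
      else if e_r - dx < 0 then 0
      else solutionGo n m rest (max 0 (s_r - dx)) s_c (max 0 (e_r - dx)) e_c

def solution (n : Int) (m : Int) (x : Int) (y : Int) (queries : List (Int × Int)) : Int :=
  solutionGo n m queries.reverse x y x y

-- ===== PORT B =====
-- 1D axis simulation over (forward, dx) steps in reverse query order; none = impossible.
def axisGo (L : Int) : List (Bool × Int) → Int → Int → Option Int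
  | [], s, e => some (e - s + 1)
  | (forward, dx) :: rest, s, e =>
    if forward then
      if s = 0 then axisGo L rest s (min (L - 1) (e + dx))
      else if s + dx ≥ L then none
      else axisGo L rest (min (L - 1) (s + dx)) (min (L - 1) (e + dx))
    else
      if e = L - 1 then axisGo L rest (max 0 (s - dx)) e
      else if e - dx < 0 then none
      else axisGo L rest (max 0 (s - dx)) (max 0 (e - dx))

def colSteps (qs : List (Int × Int)) : List (Bool × Int) :=
  (qs.filter (fun p => p.1 = 0 ∨ p.1 = 1)).map (fun p => (p.1 = 0, p.2))

def rowSteps (qs : List (Int × Int)) : List (Bool × Int) :=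
  (qs.filter (fun p => ¬ (p.1 = 0 ∨ p.1 = 1))).map (fun p => (p.1 = 2, p.2))

def solution_alt (n : Int) (m : Int) (x : Int) (y : Int) (queries : List (Int × Int)) : Int :=
  let rev := queries.reverse
  match axisGo m (colSteps rev) y y, axisGo n (rowSteps rev) x x with
  | some c, some r => r * c
  | _, _ => 0

-- ===== PRECONDITION & SPEC =====
def Spec_solution (n : Int) (m : Int) (x : Int) (y : Int) (queries : List (Int × Int)) (out : Int) : Prop := out = solution_alt n m x y queries
instance (n : Int) (m : Int) (x : Int) (y : Int) (queries : List (Int × Int)) (out : Int) : Decidable (Spec_solution n m x y queries out) := by unfold Spec_solution; infer_instance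

-- ===== CLAIM (what is proved, stated in full; the proofs are below) =====
def Claim_equal_solution : Prop := ∀ (n : Int) (m : Int) (x : Int) (y : Int) (queries : List (Int × Int)), Dom_solution n m x y queries → Spec_solution n m x y queries (solution n m x y queries)

-- ===== LEMMAS AND PROOFS =====

theorem solutionGo_axes (n m : Int) (qs : List (Int × Int)) (s_r s_c e_r e_c : Int) :
    solutionGo n m qs s_r s_c e_r e_c =
      (match axisGo m (colSteps qs) s_c e_c, axisGo n (rowSteps qs) s_r e_r with
       | some c, some r => r * c
       | _, _ => 0) := by
  induction qs generalizing s_r s_c e_r e_c with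
  | nil => simp [solutionGo, colSteps, rowSteps, axisGo]
  | cons hd rest ih =>
    obtain ⟨d, dx⟩ := hd
    by_cases h0 : d = 0
    · by_cases hs : s_c = 0 <;>
        by_cases him : s_c + dx ≥ m <;>
        simp [solutionGo, colSteps, rowSteps, axisGo, h0, hs, him, ih]
    · by_cases h1 : d = 1
      · by_cases he : e_c = m - 1 <;>
          by_cases him : e_c - dx < 0 <;>
          simp [solutionGo, colSteps, rowSteps, axisGo, h1, he, him, ih]
      · by_cases h2 : d = 2
        · by_cases hs : s_r = 0 <;>
            by_cases him : s_r + dx ≥ n <;>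
            simp [solutionGo, colSteps, rowSteps, axisGo, h2, hs, him, ih]
        · by_cases he : e_r = n - 1 <;>
            by_cases him : e_r - dx < 0 <;>
            simp [solutionGo, colSteps, rowSteps, axisGo, h0, h1, h2, he, him, ih]

-- ===== VERDICT (by name: the statement is the Claim_ definition above) =====
theorem solution_spec : Claim_equal_solution := by
  intro n m x y queries _
  unfold Spec_solution solution solution_alt
  exact solutionGo_axes n m queries.reverse x y x y
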